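-- pv_equiv track=rewrite | github.com/caustinbrooks/Tick_Scraper | get_dates.py | get_all_days
-- ===== SOURCE A (Python) =====
-- def get_all_days(min_year,max_year):
--     years = list(range(min_year,max_year + 1))
--     months = list(range(1,13))
--     days = list (range(1,32))
--     start_dates = []
--
--
--     for yyyy in years:
--         for mm in months:
--             for dd in days:
--
--                 if mm in [1,3,5,7,8,10,12]:
--                     if mm <10:
--                         mm_str = '0'+str(mm)
--                     else:
--                         mm_str = str(mm)
--
--                     if dd <10:
--                         dd_str = '0' + str(dd)
--                     else:
--                         dd_str = str(dd)
--
--                     start_dates.append(str(yyyy)+'-'+mm_str+'-'+dd_str)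
--
--                 elif mm in [4,6,9,11]:
--                     if mm <10:
--                         mm_str = '0'+str(mm)
--                     else:
--                         mm_str = str(mm)
--
--                     if dd <10:
--                         dd_str = '0' + str(dd)
--                     else:
--                         dd_str = str(dd)
--                     if dd < 31:
--                         start_dates.append(str(yyyy)+'-'+mm_str+'-'+dd_str)
--
--                 else:
--                     if mm <10:
--                         mm_str = '0'+str(mm)
--                     else:
--                         mm_str = str(mm)
--                     if dd <10:
--                         dd_str = '0' + str(dd)
--                     else:
--                         dd_str = str(dd)
--                     if dd < 29:
--                         start_dates.append(str(yyyy)+'-'+mm_str+'-'+dd_str)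
--
--
--
--     return start_dates
-- ===== SOURCE B (Python) =====
-- def get_all_days(min_year, max_year):
--     # month-length table (February fixed at 28, as in the original)
--     days_in_month = [31, 28, 31, 30, 31, 30, 31, 31, 30, 31, 30, 31]
--     start_dates = []
--     for yyyy in range(min_year, max_year + 1):
--         for mm, ndays in zip(range(1, 13), days_in_month):
--             for dd in range(1, ndays + 1):
--                 start_dates.append('%d-%02d-%02d' % (yyyy, mm, dd))
--     return start_dates
-- ===== Notes on version B (the rewrite author's own statement) =====
-- stated objective: simpler
-- what changed: Replaces the full 31-day grid with membership-list branches and dd<31/dd<29 filters by a month-length table zipped with the months, so the inner loop runs exactly the right number of days and all day-filter branches disappear.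
import Mathlib
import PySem

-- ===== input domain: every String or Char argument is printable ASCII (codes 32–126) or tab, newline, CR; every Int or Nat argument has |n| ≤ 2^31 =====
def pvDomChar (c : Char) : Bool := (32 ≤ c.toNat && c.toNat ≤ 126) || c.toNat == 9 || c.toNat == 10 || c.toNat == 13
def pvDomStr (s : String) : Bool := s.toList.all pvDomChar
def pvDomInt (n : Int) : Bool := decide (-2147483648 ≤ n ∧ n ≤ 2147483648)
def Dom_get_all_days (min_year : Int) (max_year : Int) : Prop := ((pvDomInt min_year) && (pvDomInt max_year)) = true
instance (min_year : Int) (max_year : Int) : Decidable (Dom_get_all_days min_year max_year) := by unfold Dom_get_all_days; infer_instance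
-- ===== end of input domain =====

-- B replaces A's 31-day grid with day-filter branches by a month-length table zipped with the months (simpler).

-- ===== PORT A =====
def get_all_days (min_year : Int) (max_year : Int) : List String :=
  let years := PySem.List.pyRange min_year (max_year + 1) 1
  let months := PySem.List.pyRange 1 13 1
  let days := PySem.List.pyRange 1 32 1
  years.foldl (fun acc yyyy =>
    months.foldl (fun acc mm =>
      days.foldl (fun acc dd =>
        if mm ∈ ([1,3,5,7,8,10,12] : List Int) then
          let mm_str := if mm < 10 then "0" ++ PySem.Int.toStr mm else PySem.Int.toStr mm
          let dd_str := if dd < 10 then "0" ++ PySem.Int.toStr dd else PySem.Int.toStr dd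
          acc ++ [PySem.Int.toStr yyyy ++ "-" ++ mm_str ++ "-" ++ dd_str]
        else if mm ∈ ([4,6,9,11] : List Int) then
          let mm_str := if mm < 10 then "0" ++ PySem.Int.toStr mm else PySem.Int.toStr mm
          let dd_str := if dd < 10 then "0" ++ PySem.Int.toStr dd else PySem.Int.toStr dd
          if dd < 31 then acc ++ [PySem.Int.toStr yyyy ++ "-" ++ mm_str ++ "-" ++ dd_str] else acc
        else
          let mm_str := if mm < 10 then "0" ++ PySem.Int.toStr mm else PySem.Int.toStr mm
          let dd_str := if dd < 10 then "0" ++ PySem.Int.toStr dd else PySem.Int.toStr dd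
          if dd < 29 then acc ++ [PySem.Int.toStr yyyy ++ "-" ++ mm_str ++ "-" ++ dd_str] else acc)
        acc) acc) []

-- ===== PORT B =====
-- '%02d' % n for n ≥ 0: zero-pad to width 2
def pvPad2 (n : Int) : String :=
  if n < 10 then "0" ++ PySem.Int.toStr n else PySem.Int.toStr n

def get_all_days_alt (min_year : Int) (max_year : Int) : List String :=
  let days_in_month : List Int := [31, 28, 31, 30, 31, 30, 31, 31, 30, 31, 30, 31]
  (PySem.List.pyRange min_year (max_year + 1) 1).foldl (fun acc yyyy =>
    ((PySem.List.pyRange 1 13 1).zip days_in_month).foldl (fun acc p =>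
      (PySem.List.pyRange 1 (p.2 + 1) 1).foldl (fun acc dd =>
        acc ++ [PySem.Int.toStr yyyy ++ "-" ++ pvPad2 p.1 ++ "-" ++ pvPad2 dd]) acc) acc) []

-- ===== PRECONDITION & SPEC =====
def Spec_get_all_days (min_year : Int) (max_year : Int) (out : List String) : Prop := out = get_all_days_alt min_year max_year
instance (min_year : Int) (max_year : Int) (out : List String) : Decidable (Spec_get_all_days min_year max_year out) := by unfold Spec_get_all_days; infer_instance

-- ===== CLAIM (what is proved, stated in full; the proofs are below) =====
def Claim_equal_get_all_days : Prop := ∀ (min_year : Int) (max_year : Int), Dom_get_all_days min_year max_year → Spec_get_all_days min_year max_year (get_all_days min_year max_year)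

-- ===== LEMMAS AND PROOFS =====

set_option maxRecDepth 4000 in
-- the per-year bodies of the two ports agree (both ranges are literal, so this is a computation)
theorem pv_inner_eq (acc : List String) (yyyy : Int) :
    (PySem.List.pyRange 1 13 1).foldl (fun acc mm =>
      (PySem.List.pyRange 1 32 1).foldl (fun acc dd =>
        if mm ∈ ([1,3,5,7,8,10,12] : List Int) then
          let mm_str := if mm < 10 then "0" ++ PySem.Int.toStr mm else PySem.Int.toStr mm
          let dd_str := if dd < 10 then "0" ++ PySem.Int.toStr dd else PySem.Int.toStr dd
          acc ++ [PySem.Int.toStr yyyy ++ "-" ++ mm_str ++ "-" ++ dd_str]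
        else if mm ∈ ([4,6,9,11] : List Int) then
          let mm_str := if mm < 10 then "0" ++ PySem.Int.toStr mm else PySem.Int.toStr mm
          let dd_str := if dd < 10 then "0" ++ PySem.Int.toStr dd else PySem.Int.toStr dd
          if dd < 31 then acc ++ [PySem.Int.toStr yyyy ++ "-" ++ mm_str ++ "-" ++ dd_str] else acc
        else
          let mm_str := if mm < 10 then "0" ++ PySem.Int.toStr mm else PySem.Int.toStr mm
          let dd_str := if dd < 10 then "0" ++ PySem.Int.toStr dd else PySem.Int.toStr dd
          if dd < 29 then acc ++ [PySem.Int.toStr yyyy ++ "-" ++ mm_str ++ "-" ++ dd_str] else acc)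
        acc) acc
    =
    ((PySem.List.pyRange 1 13 1).zip ([31,28,31,30,31,30,31,31,30,31,30,31] : List Int)).foldl (fun acc p =>
      (PySem.List.pyRange 1 (p.2 + 1) 1).foldl (fun acc dd =>
        acc ++ [PySem.Int.toStr yyyy ++ "-" ++ pvPad2 p.1 ++ "-" ++ pvPad2 dd]) acc) acc := by
  rfl

theorem pv_foldl_congr {α β : Type} (f g : List α → β → List α) (l : List β)
    (init : List α) (h : ∀ acc y, f acc y = g acc y) :
    l.foldl f init = l.foldl g init := by
  induction l generalizing init with
  | nil => rfl
  | cons x xs ih => simp only [List.foldl_cons, h]; exact ih _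

-- ===== VERDICT (by name: the statement is the Claim_ definition above) =====
theorem get_all_days_spec : Claim_equal_get_all_days := by
  intro min_year max_year _
  unfold Spec_get_all_days get_all_days get_all_days_alt
  exact pv_foldl_congr _ _ _ _ pv_inner_eq
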